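-- pv_equiv track=rewrite | github.com/fangearhq-boop/content-pipeline | _engine/scripts/generate-postplanner-export.py | strip_hashtags
-- ===== SOURCE A (Python) =====
-- def strip_hashtags(text):
--     """Remove all hashtags and their preceding blank line from post text."""
--     # Remove lines that are only hashtags
--     lines = text.split("\n")
--     cleaned = []
--     for line in lines:
--         stripped = line.strip()
--         # Skip lines that are entirely hashtags
--         if stripped and all(word.startswith("#") for word in stripped.split()):
--             continue
--         cleaned.append(line)
--     # Remove trailing blank lines left behind
--     while cleaned and not cleaned[-1].strip():
--         cleaned.pop()
--     return "\n".join(cleaned)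
-- ===== SOURCE B (Python) =====
-- def strip_hashtags(text):
--     """Remove all hashtags and their preceding blank line from post text."""
--     # Single pass: buffer whitespace-only lines; flush them only before a
--     # real content line, so trailing blanks are dropped automatically.
--     output = []
--     pending = []
--     for line in text.split("\n"):
--         stripped = line.strip()
--         if stripped and all(word.startswith("#") for word in stripped.split()):
--             continue
--         if not stripped:
--             pending.append(line)
--         else:
--             output.extend(pending)
--             pending = []
--             output.append(line)
--     return "\n".join(output)
-- ===== Notes on version B (the rewrite author's own statement) =====
-- stated objective: alternative
-- what changed: Replaces A's two-phase approach (build a filtered list, then pop trailing blank lines off its end in a while loop) with a single pass that buffers whitespace-only lines in a pending list and flushes it only when a real content line follows, so trailing blanks are never emitted.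
import Mathlib
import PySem

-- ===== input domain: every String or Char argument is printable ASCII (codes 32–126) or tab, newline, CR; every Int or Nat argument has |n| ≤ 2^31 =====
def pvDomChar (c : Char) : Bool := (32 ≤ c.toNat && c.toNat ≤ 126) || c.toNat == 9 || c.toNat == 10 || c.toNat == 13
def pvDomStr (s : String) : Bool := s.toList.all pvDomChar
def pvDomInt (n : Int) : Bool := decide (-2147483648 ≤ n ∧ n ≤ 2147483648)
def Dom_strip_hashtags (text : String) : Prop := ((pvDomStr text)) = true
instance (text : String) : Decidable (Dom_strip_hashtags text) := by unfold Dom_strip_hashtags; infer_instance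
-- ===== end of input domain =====

-- B replaces A's filter-then-pop-trailing two-phase pass by a single pass that
-- buffers whitespace-only lines and flushes them only before a content line
-- (objective: alternative decomposition, same cost).

-- ===== PORT A =====
-- 'stripped and all(word.startswith("#") for word in stripped.split())' (shared by both ports)
def pvSkip (line : String) : Bool :=
  let stripped := PySem.Str.strip line
  stripped != "" && (PySem.Str.split₀ stripped).all (fun w => PySem.Str.startswith w "#")

-- 'not line.strip()' (truthiness of the stripped line)
def pvBlank (line : String) : Bool := PySem.Str.strip line == ""

-- 'while cleaned and not cleaned[-1].strip(): cleaned.pop()'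
def pvPopTrailing (cleaned : List String) : List String :=
  match h : cleaned.getLast? with
  | some last =>
    if pvBlank last then pvPopTrailing cleaned.dropLast else cleaned
  | none => cleaned
termination_by cleaned.length
decreasing_by
  have hne : cleaned ≠ [] := by
    intro hnil; rw [hnil] at h; simp at h
  have hpos : 0 < cleaned.length := List.length_pos_of_ne_nil hne
  simp only [List.length_dropLast]; omega

def strip_hashtags (text : String) : String :=
  -- the separator is the literal "\n" ≠ "", so split? is always `some`
  let lines := (PySem.Str.split? text "\n").getD []
  let cleaned := lines.foldl (fun acc line => if pvSkip line then acc else acc ++ [line]) []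
  PySem.Str.join "\n" (pvPopTrailing cleaned)

-- ===== PORT B =====
def pvGoB (output pending : List String) : List String → List String
  | [] => output
  | line :: rest =>
    if pvSkip line then pvGoB output pending rest
    else if pvBlank line then pvGoB output (pending ++ [line]) rest
    else pvGoB (output ++ pending ++ [line]) [] rest

def strip_hashtags_alt (text : String) : String :=
  PySem.Str.join "\n" (pvGoB [] [] ((PySem.Str.split? text "\n").getD []))

-- ===== PRECONDITION & SPEC =====
def Spec_strip_hashtags (text : String) (out : String) : Prop := out = strip_hashtags_alt text
instance (text : String) (out : String) : Decidable (Spec_strip_hashtags text out) := by unfold Spec_strip_hashtags; infer_instance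

-- ===== CLAIM (what is proved, stated in full; the proofs are below) =====
def Claim_equal_strip_hashtags : Prop := ∀ (text : String), Dom_strip_hashtags text → Spec_strip_hashtags text (strip_hashtags text)

-- ===== LEMMAS AND PROOFS =====
-- A's loop builds the filtered line list
theorem foldlA_eq_filter (lines : List String) (acc : List String) :
    lines.foldl (fun acc line => if pvSkip line then acc else acc ++ [line]) acc
      = acc ++ lines.filter (fun l => !pvSkip l) := by
  induction lines generalizing acc with
  | nil => simp
  | cons l rest ih =>
    by_cases h : pvSkip l = true <;> simp [List.foldl, h, ih]

-- A's pop-while is dropWhile blank on the reverse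
theorem pvPopTrailing_eq (l : List String) :
    pvPopTrailing l = (l.reverse.dropWhile pvBlank).reverse := by
  induction l using List.reverseRecOn with
  | nil => simp [pvPopTrailing]
  | append_singleton l x ih =>
    rw [pvPopTrailing]
    split
    · next last hlast =>
        rw [List.getLast?_concat] at hlast
        injection hlast with hx
        subst hx
        rw [List.dropLast_concat]
        by_cases h : pvBlank x = true <;> simp [h, ih]
    · next hlast => rw [List.getLast?_concat] at hlast; simp at hlast

theorem dropWhile_all {α : Type} (p : α → Bool) (l : List α) (h : ∀ a ∈ l, p a = true) :
    l.dropWhile p = [] := by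
  rw [List.dropWhile_eq_nil_iff]
  intro a ha; exact h a (by simpa using ha)

theorem dropWhile_append_not {α : Type} (p : α → Bool) (a b : List α) (x : α)
    (hx : p x = false) :
    (a ++ x :: b).dropWhile p = a.dropWhile p ++ x :: b := by
  rw [List.dropWhile_append]
  by_cases h : (a.dropWhile p).isEmpty = true
  · rw [if_pos h, List.isEmpty_iff.mp h, List.dropWhile_cons_of_neg (by simp [hx])]
    simp
  · rw [if_neg h]

-- B's single pass computes A's filter-then-drop-trailing result
theorem pvGoB_eq (rest : List String) (output pending : List String)
    (hp : ∀ p ∈ pending, pvBlank p = true) :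
    pvGoB output pending rest
      = output ++ ((pending ++ rest.filter (fun l => !pvSkip l)).reverse.dropWhile pvBlank).reverse := by
  induction rest generalizing output pending with
  | nil =>
    simp [pvGoB, dropWhile_all pvBlank pending.reverse (by intro a ha; exact hp a (by simpa using ha))]
  | cons line rest ih =>
    by_cases hs : pvSkip line = true
    · simp [pvGoB, hs, ih _ _ hp]
    · by_cases hb : pvBlank line = true
      · have hp' : ∀ p ∈ pending ++ [line], pvBlank p = true := by
          intro p hpmem
          rcases List.mem_append.mp hpmem with h | h
          · exact hp p h
          · simpa [List.mem_singleton.mp h] using hb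
        simp [pvGoB, hs, hb, ih _ _ hp']
      · have hnil : ∀ p ∈ ([] : List String), pvBlank p = true := by intro p hpm; simp at hpm
        rw [pvGoB]
        simp only [hs, hb, if_false, Bool.false_eq_true, ih _ _ hnil]
        have : (pending ++ line :: rest.filter (fun l => !pvSkip l)).reverse
            = (rest.filter (fun l => !pvSkip l)).reverse ++ line :: pending.reverse := by
          simp
        rw [List.filter_cons_of_pos (by simp [hs]), this,
          dropWhile_append_not pvBlank _ _ _ (by simpa using hb)]
        simp

-- ===== VERDICT (by name: the statement is the Claim_ definition above) =====
theorem strip_hashtags_spec : Claim_equal_strip_hashtags := by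
  intro text _
  unfold Spec_strip_hashtags strip_hashtags strip_hashtags_alt
  simp only [foldlA_eq_filter, pvPopTrailing_eq, List.nil_append]
  rw [pvGoB_eq _ _ _ (by intro p hp; simp at hp)]
  simp
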